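-- pv_equiv track=rewrite | github.com/matthewdgreen/decipher | src/analysis/transformers.py | _outside_in_order
-- ===== SOURCE A (Python) =====
-- def _outside_in_order(size: int) -> list[int]:
--     order: list[int] = []
--     left = 0
--     right = size - 1
--     while left <= right:
--         order.append(left)
--         if left != right:
--             order.append(right)
--         left += 1
--         right -= 1
--     return order
-- ===== SOURCE B (Python) =====
-- def _outside_in_order(size: int) -> list[int]:
--     # Closed form over output positions: even position j holds j//2,
--     # odd position j holds size-1-j//2.
--     return [j // 2 if j % 2 == 0 else size - 1 - j // 2 for j in range(size)]
-- ===== Notes on version B (the rewrite author's own statement) =====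
-- stated objective: simpler
-- what changed: Replaces the two-pointer while loop with explicit left/right state and a middle-element guard by a single stateless list comprehension computing each output position from a closed form (j//2 for even j, size-1-j//2 for odd j).
import Mathlib
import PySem

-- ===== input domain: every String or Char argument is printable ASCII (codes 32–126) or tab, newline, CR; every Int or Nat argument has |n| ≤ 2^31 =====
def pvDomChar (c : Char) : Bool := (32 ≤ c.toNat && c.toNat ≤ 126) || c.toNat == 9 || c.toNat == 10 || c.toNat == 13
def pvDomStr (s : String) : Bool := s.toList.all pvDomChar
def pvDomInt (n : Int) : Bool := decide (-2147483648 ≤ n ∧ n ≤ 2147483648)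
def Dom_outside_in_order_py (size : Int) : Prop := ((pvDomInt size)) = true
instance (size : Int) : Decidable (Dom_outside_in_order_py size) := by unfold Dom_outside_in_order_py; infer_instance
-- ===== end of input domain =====

-- ===== PORT A =====
-- while left <= right: append left; if left != right append right; left += 1; right -= 1
def outsideLoop (left right : Int) (order : List Int) : List Int :=
  if left ≤ right then
    outsideLoop (left + 1) (right - 1)
      (if left ≠ right then (order ++ [left]) ++ [right] else order ++ [left])
  else order
termination_by (right + 1 - left).toNat
decreasing_by omega

def outside_in_order_py (size : Int) : List Int :=
  outsideLoop 0 (size - 1) []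

-- ===== PORT B =====
def outside_in_order_py_alt (size : Int) : List Int :=
  (PySem.List.pyRange 0 size 1).map
    (fun j => if PySem.Int.mod j 2 = 0 then PySem.Int.floordiv j 2
              else size - 1 - PySem.Int.floordiv j 2)

-- ===== PRECONDITION & SPEC =====
def Spec_outside_in_order_py (size : Int) (out : List Int) : Prop := out = outside_in_order_py_alt size
instance (size : Int) (out : List Int) : Decidable (Spec_outside_in_order_py size out) := by unfold Spec_outside_in_order_py; infer_instance

-- ===== CLAIM (what is proved, stated in full; the proofs are below) =====
def Claim_equal_outside_in_order_py : Prop := ∀ (size : Int), Dom_outside_in_order_py size → Spec_outside_in_order_py size (outside_in_order_py size)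

-- ===== LEMMAS AND PROOFS =====


-- ===== VERDICT (by name: the statement is the Claim_ definition above) =====
-- A's loop, characterised: it emits n = right+1-left values, position j holding
-- left + j/2 for even j and right - j/2 for odd j.
theorem outsideLoop_eq (n : Nat) : ∀ (left right : Int) (order : List Int),
    (right + 1 - left).toNat = n →
    outsideLoop left right order =
      order ++ (List.range n).map
        (fun (j : Nat) => if j % 2 = 0 then left + (j : Int) / 2 else right - (j : Int) / 2) := by
  induction n using Nat.strong_induction_on with
  | _ n ih =>
    intro left right order hn
    rw [outsideLoop]
    by_cases h : left ≤ right
    · simp only [if_pos h]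
      by_cases hm : left = right
      · -- n = 1
        have hn1 : n = 1 := by omega
        subst hn1
        rw [ih 0 (by omega) _ _ _ (by omega)]
        simp [hm]
      · -- n ≥ 2
        have hn2 : 2 ≤ n := by omega
        rw [if_pos hm, ih (n - 2) (by omega) _ _ _ (by omega)]
        have hrange : List.range n = 0 :: 1 :: (List.range (n - 2)).map (· + 2) := by
          have h2 : n = 2 + (n - 2) := by omega
          rw [h2, List.range_add]
          simp [List.range_succ, Nat.add_comm]
        rw [hrange]
        simp only [List.map_cons, List.map_map, List.append_assoc]
        congr 1
        simp only [List.cons_append, List.nil_append]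
        congr 1
        · norm_num
        congr 1
        · norm_num
        apply List.map_congr_left
        intro j _
        simp only [Function.comp]
        have hj2 : ((j + 2) : Int) / 2 = (j : Int) / 2 + 1 := by omega
        by_cases hp : j % 2 = 0
        · have h2 : (j + 2) % 2 = 0 := by omega
          simp [hp, h2]
          omega
        · have h2 : ¬ (j + 2) % 2 = 0 := by omega
          simp [hp, h2]
          omega
    · simp only [if_neg h]
      have : n = 0 := by omega
      simp [this]

theorem outside_in_order_py_spec : Claim_equal_outside_in_order_py := by
  unfold Claim_equal_outside_in_order_py
  intro size _
  unfold Spec_outside_in_order_py outside_in_order_py outside_in_order_py_alt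
  rw [outsideLoop_eq size.toNat 0 (size - 1) [] (by omega),
      PySem.List.pyRange_one 0 size]
  simp only [List.nil_append, List.map_map, sub_zero]
  apply List.map_congr_left
  intro j hj
  have hjlt : j < size.toNat := List.mem_range.mp hj
  simp only [Function.comp, zero_add]
  have hmod : PySem.Int.mod (j : Int) 2 = (j : Int) % 2 := by
    simp [PySem.Int.mod, Int.fmod_eq_emod]
  have hdiv : PySem.Int.floordiv (j : Int) 2 = (j : Int) / 2 := by
    simp [PySem.Int.floordiv, Int.fdiv_eq_ediv]
  rw [hmod, hdiv]
  by_cases hp : j % 2 = 0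
  · have : (j : Int) % 2 = 0 := by omega
    simp [hp, this]
  · have : ¬ (j : Int) % 2 = 0 := by omega
    simp [hp, this]
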